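-- pv_equiv track=rewrite | github.com/R-Repo/qgis-bridge | src/qgis_bridge/_uri.py | to_gdal_path
-- ===== SOURCE A (Python) =====
-- _SCHEME_MAP = {
--     "gs://": "/vsigs/",
--     "s3://": "/vsis3/",
--     "az://": "/vsiaz/",
-- }
--
-- def to_gdal_path(uri: str) -> str:
--     """Translate a cloud storage URI to a GDAL virtual filesystem path."""
--     for scheme, prefix in _SCHEME_MAP.items():
--         if uri.startswith(scheme):
--             return prefix + uri[len(scheme):]
--     supported = ", ".join(_SCHEME_MAP.keys())
--     raise ValueError(
--         f"Unrecognised URI scheme in {uri!r}. Supported: {supported}"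
--     )
-- ===== SOURCE B (Python) =====
-- _SCHEME_MAP = {
--     "gs://": "/vsigs/",
--     "s3://": "/vsis3/",
--     "az://": "/vsiaz/",
-- }
--
-- def to_gdal_path(uri: str) -> str:
--     """Translate a cloud storage URI to a GDAL virtual filesystem path."""
--     head, sep, tail = uri.partition("://")
--     if sep:
--         prefix = _SCHEME_MAP.get(head + "://")
--         if prefix is not None:
--             return prefix + tail
--     supported = ", ".join(_SCHEME_MAP.keys())
--     raise ValueError(
--         f"Unrecognised URI scheme in {uri!r}. Supported: {supported}"
--     )
-- ===== Notes on version B (the rewrite author's own statement) =====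
-- stated objective: idiomatic
-- what changed: Replaces the sequential startswith-scan over _SCHEME_MAP by a single partition on '://' followed by one keyed dict lookup of the reconstructed scheme; behaviour (including the ValueError and its message) is unchanged.
-- outside the precondition, e.g. on to_gdal_path('://'): A raises ValueError, B raises ValueError
import Mathlib
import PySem

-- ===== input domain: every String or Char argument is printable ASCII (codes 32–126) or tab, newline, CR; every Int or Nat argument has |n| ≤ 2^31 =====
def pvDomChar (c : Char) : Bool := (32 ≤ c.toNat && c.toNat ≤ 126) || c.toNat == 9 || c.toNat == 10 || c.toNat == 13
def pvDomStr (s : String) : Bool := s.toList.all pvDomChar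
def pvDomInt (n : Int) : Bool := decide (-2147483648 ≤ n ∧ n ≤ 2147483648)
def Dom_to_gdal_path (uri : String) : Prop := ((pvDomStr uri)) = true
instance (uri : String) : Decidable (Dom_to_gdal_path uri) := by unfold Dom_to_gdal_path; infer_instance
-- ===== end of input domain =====

-- B replaces A's sequential startswith-scan over the scheme map by one partition on "://" plus a single keyed dict lookup (idiomatic).

-- ===== PORT A =====
-- _SCHEME_MAP as an insertion-ordered association list
def pvSchemeMap : List (String × String) := [("gs://", "/vsigs/"), ("s3://", "/vsis3/"), ("az://", "/vsiaz/")]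

-- for scheme, prefix in _SCHEME_MAP.items(): if uri.startswith(scheme): return prefix + uri[len(scheme):]
-- the fall-through 'raise ValueError' is excluded by Pre_; the port returns "" there
def to_gdal_path (uri : String) : String :=
  match pvSchemeMap.find? (fun sp => PySem.Str.startswith uri sp.1) with
  | some (scheme, pre) => pre ++ PySem.Str.slice uri (some (PySem.Str.len scheme : Int)) none
  | none => ""

-- ===== PORT B =====
-- uri.partition("://"): some (head, tail) splitting at the FIRST "://", none if absent
def pvPartitionSep : List Char → Option (List Char × List Char)
  | ':' :: '/' :: '/' :: rest => some ([], rest)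
  | c :: cs => (pvPartitionSep cs).map (fun p => (c :: p.1, p.2))
  | [] => none

def pvSchemeDict : PySem.Dict String String := PySem.Dict.ofList pvSchemeMap

def to_gdal_path_alt (uri : String) : String :=
  match pvPartitionSep uri.toList with
  | some (head, tail) =>
    match PySem.Dict.get? pvSchemeDict (String.ofList head ++ "://") with
    | some pre => pre ++ String.ofList tail
    | none => ""   -- raise ValueError, excluded by Pre_
  | none => ""     -- raise ValueError, excluded by Pre_

-- ===== PRECONDITION & SPEC =====
-- Pre_ excludes exactly the inputs on which A raises ValueError (no recognised scheme prefix)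
def Pre_to_gdal_path (uri : String) : Prop :=
  PySem.Str.startswith uri "gs://" = true ∨ PySem.Str.startswith uri "s3://" = true ∨ PySem.Str.startswith uri "az://" = true
instance (uri : String) : Decidable (Pre_to_gdal_path uri) := by unfold Pre_to_gdal_path; infer_instance

def pvWitness_to_gdal_path : String := "gs://bucket/data.tif"

def Spec_to_gdal_path (uri : String) (out : String) : Prop := out = to_gdal_path_alt uri
instance (uri : String) (out : String) : Decidable (Spec_to_gdal_path uri out) := by unfold Spec_to_gdal_path; infer_instance

-- ===== CLAIM (what is proved, stated in full; the proofs are below) =====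
def Claim_equal_to_gdal_path : Prop := ∀ (uri : String), Dom_to_gdal_path uri → Pre_to_gdal_path uri → Spec_to_gdal_path uri (to_gdal_path uri)

-- ===== LEMMAS AND PROOFS =====

lemma a_on_gs (t : List Char) :
    to_gdal_path (String.ofList ('g' :: 's' :: ':' :: '/' :: '/' :: t)) = "/vsigs/" ++ String.ofList t := by
  simp [to_gdal_path, pvSchemeMap, PySem.Chars.startswith, List.isPrefixOf,
        PySem.Str.len, PySem.Str.slice, PySem.List.slice_from]

lemma a_on_s3 (t : List Char) :
    to_gdal_path (String.ofList ('s' :: '3' :: ':' :: '/' :: '/' :: t)) = "/vsis3/" ++ String.ofList t := by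
  simp [to_gdal_path, pvSchemeMap, PySem.Chars.startswith, List.isPrefixOf,
        PySem.Str.len, PySem.Str.slice, PySem.List.slice_from]

lemma a_on_az (t : List Char) :
    to_gdal_path (String.ofList ('a' :: 'z' :: ':' :: '/' :: '/' :: t)) = "/vsiaz/" ++ String.ofList t := by
  simp [to_gdal_path, pvSchemeMap, PySem.Chars.startswith, List.isPrefixOf,
        PySem.Str.len, PySem.Str.slice, PySem.List.slice_from]

lemma b_on_gs (t : List Char) :
    to_gdal_path_alt (String.ofList ('g' :: 's' :: ':' :: '/' :: '/' :: t)) = "/vsigs/" ++ String.ofList t := by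
  have h : PySem.Dict.get? pvSchemeDict "gs://" = some "/vsigs/" := by decide
  simp [to_gdal_path_alt, pvPartitionSep, h]

lemma b_on_s3 (t : List Char) :
    to_gdal_path_alt (String.ofList ('s' :: '3' :: ':' :: '/' :: '/' :: t)) = "/vsis3/" ++ String.ofList t := by
  have h : PySem.Dict.get? pvSchemeDict "s3://" = some "/vsis3/" := by decide
  simp [to_gdal_path_alt, pvPartitionSep, h]

lemma b_on_az (t : List Char) :
    to_gdal_path_alt (String.ofList ('a' :: 'z' :: ':' :: '/' :: '/' :: t)) = "/vsiaz/" ++ String.ofList t := by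
  have h : PySem.Dict.get? pvSchemeDict "az://" = some "/vsiaz/" := by decide
  simp [to_gdal_path_alt, pvPartitionSep, h]

-- ===== VERDICT (by name: the statement is the Claim_ definition above) =====
theorem to_gdal_path_spec : Claim_equal_to_gdal_path := by
  intro uri _ hpre
  unfold Spec_to_gdal_path
  rcases hpre with h | h | h <;>
  · rw [PySem.Str.startswith_eq, PySem.Chars.startswith_iff] at h
    obtain ⟨t, ht⟩ := h
    have huri : uri = String.ofList uri.toList := (String.ofList_toList).symm
    rw [huri, ← ht]
    first
      | rw [show ("gs://".toList = ['g','s',':','/','/']) from rfl]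
        simp only [List.cons_append, List.nil_append]
        rw [a_on_gs, b_on_gs]
      | rw [show ("s3://".toList = ['s','3',':','/','/']) from rfl]
        simp only [List.cons_append, List.nil_append]
        rw [a_on_s3, b_on_s3]
      | rw [show ("az://".toList = ['a','z',':','/','/']) from rfl]
        simp only [List.cons_append, List.nil_append]
        rw [a_on_az, b_on_az]
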